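-- pv_equiv track=rewrite | github.com/AdamKoziak1/LogicalDistillationOfGNNs | idt/idt.py | _feature_depth_index
-- ===== SOURCE A (Python) =====
-- def _feature_depth_index(index, depth_indices):
--     from idt.ui import DBG, HLT, NEW, NXT, END, MRK, HLN, CND, ERR, PLT
--     index = index % sum(depth_indices)
--     depth = -1
--     for i in depth_indices:
--         if index < i:
--             return depth, index
--         index -= i
--         depth += 1
-- ===== SOURCE B (Python) =====
-- def _feature_depth_index(index, depth_indices):
--     from itertools import accumulate
--     from bisect import bisect_right
--     cum = list(accumulate(depth_indices))
--     index = index % cum[-1]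
--     b = bisect_right(cum, index)
--     return b - 1, index - (cum[b - 1] if b else 0)
-- ===== Notes on version B (the rewrite author's own statement) =====
-- stated objective: alternative
-- what changed: Replaces the linear subtract-and-scan loop with a precomputed prefix-sum list (itertools.accumulate) and a binary search (bisect_right) that locates the bucket directly.
-- outside the precondition, e.g. on _feature_depth_index(1, [2, -1, 2]): A returns (-1, 1), B returns (1, 0); on _feature_depth_index(0, []): A raises ZeroDivisionError, B raises IndexError
import Mathlib
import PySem

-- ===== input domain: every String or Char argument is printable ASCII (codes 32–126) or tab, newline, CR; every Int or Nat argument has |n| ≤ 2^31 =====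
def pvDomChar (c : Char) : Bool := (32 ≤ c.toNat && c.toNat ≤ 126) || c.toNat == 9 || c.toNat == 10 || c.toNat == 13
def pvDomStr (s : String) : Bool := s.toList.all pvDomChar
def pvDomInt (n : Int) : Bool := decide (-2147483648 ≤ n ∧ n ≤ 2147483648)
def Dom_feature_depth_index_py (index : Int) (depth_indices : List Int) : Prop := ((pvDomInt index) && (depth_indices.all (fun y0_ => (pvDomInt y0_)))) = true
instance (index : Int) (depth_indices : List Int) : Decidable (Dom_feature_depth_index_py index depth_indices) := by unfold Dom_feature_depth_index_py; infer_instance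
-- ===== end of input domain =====

-- B replaces A's subtract-and-scan loop by a prefix-sum list plus a binary search (alternative decomposition, not claimed faster).


-- ===== PORT A =====
-- A's for-loop: return (depth, index) at the first bucket with index < i, else fall through (Python returns None; none here).
def pvALoop (index depth : Int) : List Int → Option (Int × Int)
  | [] => none
  | i :: rest => if index < i then some (depth, index) else pvALoop (index - i) (depth + 1) rest

def feature_depth_index_py (index : Int) (depth_indices : List Int) : Int × Int :=
  let index := PySem.Int.mod index depth_indices.sum
  (pvALoop index (-1) depth_indices).getD (0, 0)

-- ===== PORT B =====
-- itertools.accumulate (running sums)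
def pvAccum (acc : Int) : List Int → List Int
  | [] => []
  | i :: rest => (acc + i) :: pvAccum (acc + i) rest

-- bisect.bisect_right, transliterated as the standard lo/hi binary search it implements
def pvBisectGo (cum : List Int) (x : Int) (lo hi : Nat) : Nat :=
  if _h : lo < hi then
    let mid := (lo + hi) / 2
    if cum.getD mid 0 ≤ x then pvBisectGo cum x (mid + 1) hi else pvBisectGo cum x lo mid
  else lo
termination_by hi - lo
decreasing_by all_goals omega

def feature_depth_index_py_alt (index : Int) (depth_indices : List Int) : Int × Int :=
  let cum := pvAccum 0 depth_indices
  let total := (PySem.List.pyGet? cum (-1)).getD 0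
  let index := PySem.Int.mod index total
  let b := pvBisectGo cum index 0 cum.length
  ((b : Int) - 1, index - (if b ≠ 0 then cum.getD (b - 1) 0 else 0))

-- ===== PRECONDITION & SPEC =====
-- Pre_ restricts to the function's natural domain: nonnegative bucket widths with a positive total.
-- A zero total makes A raise ZeroDivisionError (and B raise IndexError); on lists containing negative
-- widths the prefix list is not monotone, so A's scan result there is an accident of the scan order
-- that a bucket lookup has no reason to reproduce.
def Pre_feature_depth_index_py (index : Int) (depth_indices : List Int) : Prop :=
  0 < depth_indices.sum ∧ ∀ i ∈ depth_indices, 0 ≤ i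
instance (index : Int) (depth_indices : List Int) : Decidable (Pre_feature_depth_index_py index depth_indices) := by unfold Pre_feature_depth_index_py; infer_instance

def pvWitness_feature_depth_index_py : Int × List Int := (5, [1, 0, 2])

def Spec_feature_depth_index_py (index : Int) (depth_indices : List Int) (out : Int × Int) : Prop := out = feature_depth_index_py_alt index depth_indices
instance (index : Int) (depth_indices : List Int) (out : Int × Int) : Decidable (Spec_feature_depth_index_py index depth_indices out) := by unfold Spec_feature_depth_index_py; infer_instance

-- ===== CLAIM (what is proved, stated in full; the proofs are below) =====
def Claim_equal_feature_depth_index_py : Prop := ∀ (index : Int) (depth_indices : List Int), Dom_feature_depth_index_py index depth_indices → Pre_feature_depth_index_py index depth_indices → Spec_feature_depth_index_py index depth_indices (feature_depth_index_py index depth_indices)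

-- ===== LEMMAS AND PROOFS =====

theorem pvAccum_length (l : List Int) (a : Int) : (pvAccum a l).length = l.length := by
  induction l generalizing a with
  | nil => rfl
  | cons i rest ih => simp [pvAccum, ih]

theorem pvAccum_getLast? (l : List Int) (a : Int) (h : l ≠ []) :
    (pvAccum a l).getLast? = some (a + l.sum) := by
  induction l generalizing a with
  | nil => exact absurd rfl h
  | cons i rest ih =>
    cases rest with
    | nil => simp [pvAccum]
    | cons j t =>
      show ((a + i) :: (a + i + j) :: pvAccum (a + i + j) t).getLast? = some (a + (i :: j :: t).sum)
      rw [List.getLast?_cons_cons,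
        show (a + i + j) :: pvAccum (a + i + j) t = pvAccum (a + i) (j :: t) from rfl,
        ih (a + i) (by simp)]
      simp; ring

theorem pvAccum_getD (l : List Int) (a : Int) (k : Nat) (hk : k < l.length) :
    (pvAccum a l).getD k 0 = a + (l.take (k + 1)).sum := by
  induction l generalizing a k with
  | nil => simp at hk
  | cons i rest ih =>
    cases k with
    | zero => simp [pvAccum]
    | succ m =>
      simp only [pvAccum, List.getD_cons_succ, List.take_succ_cons, List.sum_cons]
      rw [ih (a + i) m (by simpa using hk)]
      ring

theorem take_sum_mono (l : List Int) (hnn : ∀ i ∈ l, 0 ≤ i) (m n : Nat) (h : m ≤ n) :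
    (l.take m).sum ≤ (l.take n).sum := by
  induction l generalizing m n with
  | nil => simp
  | cons i rest ih =>
    cases m with
    | zero =>
      simp only [List.take_zero, List.sum_nil]
      cases n with
      | zero => simp
      | succ n' =>
        simp only [List.take_succ_cons, List.sum_cons]
        have h1 : (0:Int) ≤ i := hnn i (by simp)
        have h2 : (0:Int) ≤ (rest.take n').sum :=
          List.sum_nonneg (fun x hx => hnn x (by simp [List.mem_of_mem_take hx]))
        omega
    | succ m' =>
      cases n with
      | zero => omega
      | succ n' =>
        simp only [List.take_succ_cons, List.sum_cons]
        have := ih (fun x hx => hnn x (by simp [hx])) m' n' (by omega)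
        omega

theorem pvBisect_eq (A : List Int) (x : Int) (N : Nat) (hN : N ≤ A.length)
    (h1 : ∀ i, i < N → A.getD i 0 ≤ x)
    (h2 : ∀ i, N ≤ i → i < A.length → x < A.getD i 0) :
    ∀ fuel lo hi, hi - lo ≤ fuel → lo ≤ N → N ≤ hi → hi ≤ A.length →
      pvBisectGo A x lo hi = N := by
  intro fuel
  induction fuel with
  | zero =>
    intro lo hi hf hlo hhi _
    rw [pvBisectGo]
    simp only [dif_neg (by omega : ¬ lo < hi)]
    omega
  | succ f ih =>
    intro lo hi hf hlo hhi hlen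
    rw [pvBisectGo]
    by_cases hlt : lo < hi
    · simp only [dif_pos hlt]
      set mid := (lo + hi) / 2 with hmid
      have hm1 : lo ≤ mid := by omega
      have hm2 : mid < hi := by omega
      by_cases hc : A.getD mid 0 ≤ x
      · simp only [if_pos hc]
        have : mid < N := by
          by_contra hcon
          exact absurd (h2 mid (by omega) (by omega)) (by omega)
        exact ih (mid + 1) hi (by omega) (by omega) hhi hlen
      · simp only [if_neg hc]
        have : N ≤ mid := by
          by_contra hcon
          exact hc (h1 mid (by omega))
        exact ih lo mid (by omega) hlo (by omega) (by omega)
    · simp only [dif_neg hlt]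
      omega

theorem pvALoop_eq (l : List Int) : ∀ (acc idx d : Int), (∀ i ∈ l, 0 ≤ i) → acc ≤ idx →
    idx < acc + l.sum →
    pvALoop (idx - acc) d l =
      some (d + (((pvAccum acc l).takeWhile (fun c => decide (c ≤ idx))).length : Int),
            idx - (acc + (l.take ((pvAccum acc l).takeWhile (fun c => decide (c ≤ idx))).length).sum)) := by
  induction l with
  | nil => intro acc idx d _ h1 h2; simp at h2; omega
  | cons i rest ih =>
    intro acc idx d hnn h1 h2
    by_cases hc : idx - acc < i
    · have hdec : decide ((acc + i) ≤ idx) = false := by simp; omega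
      simp only [pvAccum, List.takeWhile_cons, hdec, pvALoop, if_pos hc]
      simp
    · have hdec : decide ((acc + i) ≤ idx) = true := by simp; omega
      simp only [pvAccum, List.takeWhile_cons, hdec, pvALoop, if_neg hc]
      have heq : idx - acc - i = idx - (acc + i) := by ring
      rw [heq, ih (acc + i) idx (d + 1) (fun x hx => hnn x (by simp [hx])) (by omega)
        (by simp at h2 ⊢; omega)]
      congr 1
      ext <;> simp <;> push_cast <;> ring

-- Everything before takeWhile-length satisfies the predicate
theorem getD_takeWhile_lt {p : Int → Bool} (A : List Int) (i : Nat)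
    (h : i < (A.takeWhile p).length) : p (A.getD i 0) = true := by
  induction A generalizing i with
  | nil => simp at h
  | cons a t ih =>
    by_cases hp : p a
    · cases i with
      | zero => simpa [List.getD]
      | succ m =>
        simp only [List.takeWhile_cons, hp, if_true, List.length_cons] at h
        exact ih m (by omega)
    · simp [hp] at h

theorem length_takeWhile_le' {p : Int → Bool} (A : List Int) : (A.takeWhile p).length ≤ A.length :=
  List.Sublist.length_le (List.takeWhile_sublist p)

-- The element AT the takeWhile-length (if any) fails the predicate
theorem getD_takeWhile_at {p : Int → Bool} (A : List Int)
    (h : (A.takeWhile p).length < A.length) : p (A.getD (A.takeWhile p).length 0) = false := by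
  induction A with
  | nil => simp at h
  | cons a t ih =>
    by_cases hp : p a
    · simp only [List.takeWhile_cons, hp, if_true, List.length_cons, List.getD_cons_succ]
      exact ih (by simpa [List.takeWhile_cons, hp] using h)
    · simpa [List.takeWhile_cons, hp] using hp

theorem feature_depth_index_py_spec : Claim_equal_feature_depth_index_py := by
  unfold Claim_equal_feature_depth_index_py Spec_feature_depth_index_py
  intro index l _ hpre
  obtain ⟨hsum, hnn⟩ := hpre
  have hne : l ≠ [] := by intro h; rw [h] at hsum; simp at hsum
  -- the modded index
  have hm0 : 0 ≤ PySem.Int.mod index l.sum := PySem.Int.mod_nonneg index hsum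
  have hm1 : PySem.Int.mod index l.sum < l.sum := PySem.Int.mod_lt index hsum
  set idx := PySem.Int.mod index l.sum with hidx
  -- B's total equals l.sum
  have htot : (PySem.List.pyGet? (pvAccum 0 l) (-1)).getD 0 = l.sum := by
    rw [PySem.List.pyGet?_neg_one, pvAccum_getLast? l 0 hne]
    simp
  -- the common bucket count
  set k := ((pvAccum 0 l).takeWhile (fun c => decide (c ≤ idx))).length with hk
  have hklen : k ≤ l.length := by
    rw [hk]; simpa [pvAccum_length] using length_takeWhile_le' (p := fun c => decide (c ≤ idx)) (pvAccum 0 l)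
  -- bisect returns k
  have hbis : pvBisectGo (pvAccum 0 l) idx 0 (pvAccum 0 l).length = k := by
    apply pvBisect_eq (pvAccum 0 l) idx k (by rw [pvAccum_length]; exact hklen)
      _ _ (pvAccum 0 l).length 0 (pvAccum 0 l).length (by omega) (by omega)
      (by rw [pvAccum_length]; exact hklen) (le_refl _)
    · intro i hi
      have := getD_takeWhile_lt (p := fun c => decide (c ≤ idx)) (pvAccum 0 l) i (hk ▸ hi)
      simpa using this
    · intro i hile hlen
      rw [pvAccum_length] at hlen
      rw [pvAccum_getD l 0 i hlen]
      by_cases hkl : k < l.length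
      · have hfail := getD_takeWhile_at (p := fun c => decide (c ≤ idx)) (pvAccum 0 l)
          (by rw [pvAccum_length]; exact hk ▸ hkl)
        rw [← hk, pvAccum_getD l 0 k hkl] at hfail
        simp only [decide_eq_false_iff_not, not_le] at hfail
        have hmono := take_sum_mono l hnn (k + 1) (i + 1) (by omega)
        omega
      · omega
  -- A's loop result
  have hA := pvALoop_eq l 0 idx (-1) hnn hm0 (by simpa using hm1)
  rw [sub_zero] at hA
  -- assemble
  show (pvALoop idx (-1) l).getD (0, 0) = _
  rw [hA]
  have hB : feature_depth_index_py_alt index l =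
      ((k : Int) - 1, idx - (if k ≠ 0 then (pvAccum 0 l).getD (k - 1) 0 else 0)) := by
    simp only [feature_depth_index_py_alt]
    rw [htot, ← hidx, hbis]
  rw [hB, Option.getD_some]
  simp only [← hk]
  rw [Prod.mk.injEq]
  constructor
  · omega
  · by_cases hk0 : k = 0
    · simp [hk0]
    · have hk1 : k - 1 < l.length := by omega
      rw [if_pos hk0, pvAccum_getD l 0 (k - 1) hk1]
      have : k - 1 + 1 = k := by omega
      rw [this]
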